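-- pv_equiv track=rewrite | github.com/axelfj/fractals | dragoncurve.py | generarInstrucciones
-- ===== SOURCE A (Python) =====
-- def generarInstrucciones(profundidad):
--     instrucciones = "R"
--     for i in range(profundidad):
--         res = ""
--         sig = "R"
--         for inst in instrucciones:
--             res += sig + inst
--             sig = "L" if sig == "R" else "R"
--         instrucciones = res
--
--     return instrucciones
-- ===== SOURCE B (Python) =====
-- def generarInstrucciones(profundidad):
--     longitud = 2 ** profundidad if profundidad > 0 else 1
--     letras = []
--     for n in range(1, longitud + 1):
--         m = n
--         while m % 2 == 0:
--             m //= 2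
--         letras.append('R' if m % 4 == 1 else 'L')
--     return ''.join(letras)
-- ===== Notes on version B (the rewrite author's own statement) =====
-- stated objective: simpler
-- what changed: Replaces the depth-by-depth refolding of the whole instruction string with a single pass that derives each letter directly from the odd part of its 1-based position (regular paperfolding sequence).
import Mathlib
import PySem

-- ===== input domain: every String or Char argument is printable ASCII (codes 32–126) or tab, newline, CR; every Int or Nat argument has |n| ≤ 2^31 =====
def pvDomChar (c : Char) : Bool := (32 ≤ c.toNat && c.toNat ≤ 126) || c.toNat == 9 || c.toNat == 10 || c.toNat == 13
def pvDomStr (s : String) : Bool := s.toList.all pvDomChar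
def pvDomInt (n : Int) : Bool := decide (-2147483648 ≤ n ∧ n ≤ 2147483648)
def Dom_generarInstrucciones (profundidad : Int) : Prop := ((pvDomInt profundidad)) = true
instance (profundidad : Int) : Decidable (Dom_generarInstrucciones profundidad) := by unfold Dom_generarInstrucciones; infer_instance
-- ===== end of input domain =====

-- B replaces A's repeated whole-string refolding by a single pass that emits each letter
-- from the odd part of its 1-based position (objective: simpler, one direct pass).

-- ===== PORT A =====
def generarInstrucciones (profundidad : Int) : String :=
  (PySem.List.pyRange 0 profundidad 1).foldl
    (fun instrucciones _i =>
      (instrucciones.toList.foldl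
        (fun (st : String × String) inst =>
          (st.1 ++ st.2 ++ String.ofList [inst], if st.2 == "R" then "L" else "R"))
        ("", "R")).1)
    "R"

-- ===== PORT B =====
-- Source B's 'while m % 2 == 0: m //= 2'; the 'm ≠ 0' guard only makes the recursion total
-- (Source B calls it on m ≥ 1 only)
def pvOddPart (m : Nat) : Nat :=
  if m % 2 = 0 ∧ m ≠ 0 then pvOddPart (m / 2) else m
termination_by m
decreasing_by omega

def generarInstrucciones_alt (profundidad : Int) : String :=
  let longitud : Int := if profundidad > 0 then 2 ^ profundidad.toNat else 1
  String.ofList ((PySem.List.pyRange 1 (longitud + 1) 1).map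
    (fun n => if pvOddPart n.toNat % 4 = 1 then 'R' else 'L'))

-- ===== PRECONDITION & SPEC =====
def Spec_generarInstrucciones (profundidad : Int) (out : String) : Prop := out = generarInstrucciones_alt profundidad
instance (profundidad : Int) (out : String) : Decidable (Spec_generarInstrucciones profundidad out) := by unfold Spec_generarInstrucciones; infer_instance

-- ===== CLAIM (what is proved, stated in full; the proofs are below) =====
def Claim_equal_generarInstrucciones : Prop := ∀ (profundidad : Int), Dom_generarInstrucciones profundidad → Spec_generarInstrucciones profundidad (generarInstrucciones profundidad)

-- ===== LEMMAS AND PROOFS =====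

-- the letter B emits at 1-based position n
def pvG (n : Nat) : Char := if pvOddPart n % 4 = 1 then 'R' else 'L'

-- what A's inner loop appends, tracking the alternating sign as a Bool (true = "R")
def pvInterleave : List Char → Bool → List Char
  | [], _ => []
  | c :: cs, b => (if b then 'R' else 'L') :: c :: pvInterleave cs (!b)

def pvSig (b : Bool) : String := if b then "R" else "L"

-- A's outer-loop body as a function of the current string
def pvStepA (s : String) : String :=
  (s.toList.foldl
    (fun (st : String × String) inst =>
      (st.1 ++ st.2 ++ String.ofList [inst], if st.2 == "R" then "L" else "R"))
    ("", "R")).1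

theorem pvOddPart_odd (m : Nat) (h : m % 2 = 1) : pvOddPart m = m := by
  unfold pvOddPart; simp [h]

theorem pvOddPart_double (m : Nat) : pvOddPart (2 * m) = pvOddPart m := by
  rcases Nat.eq_zero_or_pos m with h | h
  · simp [h]
  · rw [pvOddPart, if_pos (by omega)]
    congr 1
    omega

theorem pvSig_flip (b : Bool) :
    (if (pvSig b == "R") = true then "L" else "R") = pvSig (!b) := by
  cases b <;> decide

theorem pvSig_cons (b : Bool) : pvSig b = String.ofList [if b then 'R' else 'L'] := by
  cases b <;> decide

theorem pvInnerFold (s : List Char) : ∀ (res : String) (b : Bool),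
    (s.foldl
      (fun (st : String × String) inst =>
        (st.1 ++ st.2 ++ String.ofList [inst], if st.2 == "R" then "L" else "R"))
      (res, pvSig b)).1 = res ++ String.ofList (pvInterleave s b) := by
  induction s with
  | nil => intro res b; simp [pvInterleave]
  | cons c cs ih =>
    intro res b
    rw [List.foldl_cons]
    show (cs.foldl _ (res ++ pvSig b ++ String.ofList [c],
        if (pvSig b == "R") = true then "L" else "R")).1 = _
    rw [pvSig_flip, ih (res ++ pvSig b ++ String.ofList [c]) (!b)]
    rw [pvInterleave, pvSig_cons]
    simp [String.append_assoc, ← String.ofList_append]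

theorem pvG_odd_pos (k : Nat) :
    pvG (2 * k + 1) = (if decide (k % 2 = 0) = true then 'R' else 'L') := by
  unfold pvG
  rw [pvOddPart_odd _ (by omega)]
  by_cases h : k % 2 = 0
  · rw [if_pos (by omega), if_pos (by simp [h])]
  · rw [if_neg (by omega), if_neg (by simp [h])]

theorem pvInterleave_range (n : Nat) : ∀ (k : Nat),
    pvInterleave ((List.range' (k + 1) n).map pvG) (decide (k % 2 = 0)) =
      (List.range' (2 * k + 1) (2 * n)).map pvG := by
  induction n with
  | zero => intro k; simp [pvInterleave]
  | succ n ih =>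
    intro k
    have h1 : (!decide (k % 2 = 0)) = decide ((k + 1) % 2 = 0) := by
      rcases Nat.mod_two_eq_zero_or_one k with h | h <;> simp [h, Nat.add_mod]
    have h4 : pvG (2 * k + 1 + 1) = pvG (k + 1) := by
      unfold pvG
      rw [show 2 * k + 1 + 1 = 2 * (k + 1) from by omega, pvOddPart_double]
    rw [List.range'_succ, List.map_cons]
    simp only [pvInterleave]
    rw [h1, ih (k + 1)]
    rw [show 2 * (n + 1) = 2 * n + 1 + 1 from by omega]
    rw [List.range'_succ, List.map_cons, List.range'_succ, List.map_cons]
    rw [pvG_odd_pos, h4]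
    rw [show 2 * k + 1 + 1 + 1 = 2 * (k + 1) + 1 from by omega]

theorem pvStepA_dragon (m : Nat) :
    pvStepA (String.ofList ((List.range' 1 m).map pvG)) =
      String.ofList ((List.range' 1 (2 * m)).map pvG) := by
  unfold pvStepA
  rw [show (String.ofList ((List.range' 1 m).map pvG)).toList
      = (List.range' 1 m).map pvG from by simp]
  have h := pvInnerFold ((List.range' 1 m).map pvG) "" true
  rw [show pvSig true = "R" from rfl] at h
  rw [h]
  have h2 := pvInterleave_range m 0
  norm_num at h2
  rw [h2]
  simp

theorem pvFoldl_const (l : List Int) : ∀ (s : String),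
    l.foldl (fun acc _ => pvStepA acc) s = pvStepA^[l.length] s := by
  induction l with
  | nil => intro s; simp
  | cons x xs ih =>
    intro s
    simp [List.foldl_cons, ih, Function.iterate_succ_apply]

theorem pvIter_dragon (t : Nat) :
    pvStepA^[t] "R" = String.ofList ((List.range' 1 (2 ^ t)).map pvG) := by
  induction t with
  | zero =>
    rw [Function.iterate_zero]
    rw [show (2 : Nat) ^ 0 = 1 from rfl, List.range'_one, List.map_singleton]
    rw [show pvG 1 = 'R' from by simp [pvG, pvOddPart_odd 1 (by norm_num)]]
    decide
  | succ t ih =>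
    rw [Function.iterate_succ_apply', ih, pvStepA_dragon]
    congr 2
    rw [pow_succ, Nat.mul_comm]

-- ===== VERDICT (by name: the statement is the Claim_ definition above) =====
theorem generarInstrucciones_spec : Claim_equal_generarInstrucciones := by
  intro d _
  unfold Spec_generarInstrucciones generarInstrucciones
  simp only [generarInstrucciones_alt]
  by_cases hd : 0 < d
  · rw [if_pos hd]
    change (PySem.List.pyRange 0 d 1).foldl (fun acc _ => pvStepA acc) "R" = _
    rw [pvFoldl_const, PySem.List.length_pyRange_one]
    rw [show (d - 0).toNat = d.toNat from by omega]
    rw [pvIter_dragon]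
    rw [PySem.List.pyRange_one,
        show ((2 : Int) ^ d.toNat + 1 - 1).toNat = 2 ^ d.toNat from by
          rw [show (2 : Int) ^ d.toNat + 1 - 1 = ((2 ^ d.toNat : Nat) : Int) from by
            push_cast; ring_nf]
          exact Int.toNat_natCast _]
    rw [List.map_map, List.range'_eq_map_range, List.map_map]
    congr 1
  · rw [if_neg hd]
    rw [PySem.List.pyRange_one_eq_nil (by omega)]
    rw [List.foldl_nil]
    rw [PySem.List.pyRange_one_singleton, List.map_singleton]
    rw [show ((1 : Int)).toNat = 1 from rfl, pvOddPart_odd 1 (by norm_num)]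
    decide
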